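-- pv_equiv track=rewrite | github.com/tuanxx31/DACTDLGT | vrpcc/mip_gurobi.py | _subtour_from
-- ===== SOURCE A (Python) =====
-- def _subtour_from(start: int, succ: dict[int, int]) -> list[int] | None:
--     """Follow succ from start until a repeat; return nodes of directed cycle (excluding closing)."""
--     seen: dict[int, int] = {}
--     order: list[int] = []
--     cur = start
--     step = 0
--     while cur in succ:
--         if cur in seen:
--             idx = seen[cur]
--             return order[idx:]
--         seen[cur] = len(order)
--         order.append(cur)
--         cur = succ[cur]
--         step += 1
--         if step > len(succ) + 5:
--             break
--     return None
-- ===== SOURCE B (Python) =====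
-- def _subtour_from(start: int, succ: dict[int, int]) -> list[int] | None:
--     """Pointer-chasing cycle detection with O(1) extra state (no visited structure):
--     advance len(succ) steps to land on the cycle or detect chain termination, measure
--     the cycle length, find the entry with two pointers that distance apart, then walk
--     once around the cycle collecting its nodes."""
--     n = len(succ)
--     cur = start
--     for _ in range(n):
--         if cur not in succ:
--             return None
--         cur = succ[cur]
--     if cur not in succ:
--         return None
--     # cur lies on the cycle: measure the cycle length lam
--     lam = 1
--     node = succ[cur]
--     while node != cur:
--         node = succ[node]
--         lam += 1
--     # two pointers lam apart meet at the cycle entry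
--     a = start
--     b = start
--     for _ in range(lam):
--         b = succ[b]
--     while a != b:
--         a = succ[a]
--         b = succ[b]
--     # walk once around the cycle from the entry
--     cycle = [a]
--     node = succ[a]
--     while node != a:
--         cycle.append(node)
--         node = succ[node]
--     return cycle
-- ===== Notes on version B (the rewrite author's own statement) =====
-- stated objective: alternative
-- what changed: A detects the cycle in one pass with a node-to-index dict and returns a slice of the recorded order; B keeps no visited structure at all: it advances a pointer len(succ) steps to land on the cycle (or detect that the chain terminates), measures the cycle length, locates the cycle entry with two pointers that distance apart, and walks once around collecting the cycle (Floyd-style pointer chasing, O(1) extra memory).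
import Mathlib
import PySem

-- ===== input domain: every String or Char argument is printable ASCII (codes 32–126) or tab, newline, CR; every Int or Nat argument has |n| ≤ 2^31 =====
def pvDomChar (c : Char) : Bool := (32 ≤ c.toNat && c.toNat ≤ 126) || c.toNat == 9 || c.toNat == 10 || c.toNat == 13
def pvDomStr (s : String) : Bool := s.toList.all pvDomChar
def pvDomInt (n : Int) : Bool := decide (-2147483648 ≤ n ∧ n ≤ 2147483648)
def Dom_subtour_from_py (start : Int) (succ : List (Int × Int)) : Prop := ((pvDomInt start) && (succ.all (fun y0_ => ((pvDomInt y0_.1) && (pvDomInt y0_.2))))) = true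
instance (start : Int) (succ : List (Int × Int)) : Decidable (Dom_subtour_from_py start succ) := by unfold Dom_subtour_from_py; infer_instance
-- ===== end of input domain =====

-- B replaces A's node-to-index dict pass by pointer chasing with O(1) extra state:
-- advance len(succ) steps onto the cycle (or detect termination), measure the cycle
-- length, meet two pointers that distance apart at the entry, walk once around.


-- ===== PORT A =====
-- A's while loop; the step counter and its 'step > len(succ) + 5' break are transliterated as
-- written.  The fuel argument only makes the recursion structural; succ.length + 6 exceeds the
-- number of iterations the step cap itself allows, so fuel 0 is never reached.
def subtourA_loop (succ : List (Int × Int)) : Nat → PySem.Dict Int Int → List Int → Int → Int → Option (List Int)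
  | 0, _, _, _, _ => none
  | fuel+1, seen, order, cur, step =>
    match (PySem.Dict.mk succ).get? cur with          -- while cur in succ
    | none => none                                    -- loop exits: return None
    | some nxt =>
      match seen.get? cur with                        -- if cur in seen
      | some idx => PySem.List.slice order (some idx) none   -- return order[idx:]
      | none =>
        let step' := step + 1
        if step' > (succ.length : Int) + 5 then none  -- break, then return None
        else subtourA_loop succ fuel (seen.insert cur (order.length : Int)) (order ++ [cur]) nxt step'

def subtour_from_py (start : Int) (succ : List (Int × Int)) : Option (List Int) :=
  subtourA_loop succ (succ.length + 6) PySem.Dict.empty [] start 0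

-- ===== PORT B =====
-- Source B keeps no visited structure.  Each while/for loop below is a fueled recursion; the fuel
-- only makes the recursion structural (the proofs show it is never exhausted on the states the
-- main function reaches).  A 'none' in a branch Python does not test (a KeyError inside the
-- later phases) is unreachable from the main function, as the proofs establish.

-- 'for _ in range(k): if cur not in succ: return None; cur = succ[cur]'
def subtourB_adv (d : PySem.Dict Int Int) : Nat → Int → Option Int
  | 0, cur => some cur
  | k+1, cur =>
    match d.get? cur with
    | none => none
    | some nxt => subtourB_adv d k nxt

-- 'lam = 1; node = succ[cur]; while node != cur: node = succ[node]; lam += 1'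
def subtourB_lam (d : PySem.Dict Int Int) (cur : Int) : Nat → Int → Nat → Option Nat
  | 0, _, _ => none
  | f+1, node, lam =>
    if node = cur then some lam
    else match d.get? node with
      | none => none          -- KeyError; unreachable from subtour_from_py_alt
      | some nxt => subtourB_lam d cur f nxt (lam+1)

-- 'while a != b: a = succ[a]; b = succ[b]'
def subtourB_entry (d : PySem.Dict Int Int) : Nat → Int → Int → Option Int
  | 0, _, _ => none
  | f+1, a, b =>
    if a = b then some a
    else match d.get? a, d.get? b with
      | some a', some b' => subtourB_entry d f a' b'
      | _, _ => none          -- KeyError; unreachable from subtour_from_py_alt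

-- 'cycle = [a]; node = succ[a]; while node != a: cycle.append(node); node = succ[node]'
def subtourB_collect (d : PySem.Dict Int Int) (a : Int) : Nat → Int → List Int → Option (List Int)
  | 0, _, _ => none
  | f+1, node, acc =>
    if node = a then some acc
    else match d.get? node with
      | none => none          -- KeyError; unreachable from subtour_from_py_alt
      | some nxt => subtourB_collect d a f nxt (acc ++ [node])

def subtour_from_py_alt (start : Int) (succ : List (Int × Int)) : Option (List Int) :=
  let d := PySem.Dict.mk succ
  let n := succ.length                       -- n = len(succ)
  match subtourB_adv d n start with          -- advance n steps (None = chain terminated)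
  | none => none
  | some cur =>
    match d.get? cur with                    -- if cur not in succ: return None
    | none => none
    | some node0 =>                          -- node = succ[cur]; cur is on the cycle
      match subtourB_lam d cur (n+1) node0 1 with
      | none => none
      | some lam =>
        match subtourB_adv d lam start with  -- for _ in range(lam): b = succ[b]
        | none => none
        | some b0 =>
          match subtourB_entry d (n+1) start b0 with
          | none => none
          | some a =>
            match d.get? a with              -- node = succ[a]
            | none => none
            | some node1 => subtourB_collect d a (n+1) node1 [a]

-- ===== PRECONDITION & SPEC =====
def Spec_subtour_from_py (start : Int) (succ : List (Int × Int)) (out : Option (List Int)) : Prop := out = subtour_from_py_alt start succ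
instance (start : Int) (succ : List (Int × Int)) (out : Option (List Int)) : Decidable (Spec_subtour_from_py start succ out) := by unfold Spec_subtour_from_py; infer_instance

-- ===== CLAIM (what is proved, stated in full; the proofs are below) =====
def Claim_equal_subtour_from_py : Prop := ∀ (start : Int) (succ : List (Int × Int)), Dom_subtour_from_py start succ → Spec_subtour_from_py start succ (subtour_from_py start succ)

-- ===== LEMMAS AND PROOFS =====

-- Reference walk (proof-only): A's loop with the seen-dict replaced by the path it records.
def pvRefLoop (succ : List (Int × Int)) : Nat → PySem.Set Int → List Int → Int → (PySem.Set Int × List Int × Int)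
  | 0, visited, path, cur => (visited, path, cur)
  | fuel+1, visited, path, cur =>
    match (PySem.Dict.mk succ).get? cur with
    | none => (visited, path, cur)
    | some nxt =>
      if PySem.Set.contains visited cur then (visited, path, cur)
      else pvRefLoop succ fuel (PySem.Set.add visited cur) (path ++ [cur]) nxt

def pvRefEmit (succ : List (Int × Int)) (path : List Int) (cur : Int) : Option (List Int) :=
  match (PySem.Dict.mk succ).get? cur with
  | none => none
  | some _ => some (path.foldl (fun cyc v => if (!cyc.isEmpty || v == cur) then cyc ++ [v] else cyc) [])

-- number of distinct keys of succ not yet on the path (termination measure of the loops)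
def pvRem (succ : List (Int × Int)) (order : List Int) : Nat :=
  (((succ.map Prod.fst).dedup).filter (fun x => !(order.contains x))).length

theorem pv_get?_mk_isSome_iff (succ : List (Int × Int)) (x : Int) :
    ((PySem.Dict.mk succ).get? x).isSome = true ↔ x ∈ succ.map Prod.fst := by
  rw [← PySem.Dict.contains_eq_isSome_get?, PySem.Dict.contains_mk]
  simp [List.any_eq_true, List.mem_map]

theorem pv_index?_append_singleton (order : List Int) (cur x : Int) (hc : cur ∉ order) :
    PySem.List.index? (order ++ [cur]) x
      = if x = cur then some order.length else PySem.List.index? order x := by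
  split
  · next h =>
    subst h
    exact (PySem.List.index?_eq_some_iff _ _ _).mpr ⟨order, [], rfl, rfl, hc⟩
  · next h =>
    cases hi : PySem.List.index? order x with
    | none =>
      have hx : x ∉ order := (PySem.List.index?_eq_none_iff _ _).mp hi
      exact (PySem.List.index?_eq_none_iff _ _).mpr (by simp [hx, h])
    | some k =>
      obtain ⟨pre, suf, heq, hlen, hpre⟩ := (PySem.List.index?_eq_some_iff _ _ _).mp hi
      exact (PySem.List.index?_eq_some_iff _ _ _).mpr
        ⟨pre, suf ++ [cur], by simp [heq], hlen, hpre⟩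

-- the emit loop: nothing is appended before the first occurrence of cur, everything after
theorem pv_emit_skip (cur : Int) (pre : List Int) (hc : cur ∉ pre) :
    pre.foldl (fun cyc v => if (!cyc.isEmpty || v == cur) then cyc ++ [v] else cyc) [] = [] := by
  induction pre with
  | nil => rfl
  | cons a t ih =>
    have ha : a ≠ cur := by rintro rfl; exact hc List.mem_cons_self
    simp only [List.foldl_cons]
    have h1 : (if (!([] : List Int).isEmpty || a == cur) = true then ([] : List Int) ++ [a] else []) = [] := by
      simp [ha]
    rw [h1]
    exact ih (fun h => hc (List.mem_cons_of_mem _ h))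

theorem pv_emit_go (cur : Int) (suf acc : List Int) (h : acc ≠ []) :
    suf.foldl (fun cyc v => if (!cyc.isEmpty || v == cur) then cyc ++ [v] else cyc) acc
      = acc ++ suf := by
  induction suf generalizing acc with
  | nil => simp
  | cons a t ih =>
    have he : acc.isEmpty = false := by simpa [List.isEmpty_iff] using h
    simp only [List.foldl_cons]
    have h1 : (if (!acc.isEmpty || a == cur) = true then acc ++ [a] else acc) = acc ++ [a] := by
      simp [he]
    rw [h1, ih (acc ++ [a]) (by simp)]
    simp

theorem pv_emit_eq (cur : Int) (pre suf : List Int) (hc : cur ∉ pre) :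
    (pre ++ cur :: suf).foldl
        (fun cyc v => if (!cyc.isEmpty || v == cur) then cyc ++ [v] else cyc) []
      = cur :: suf := by
  rw [List.foldl_append, pv_emit_skip cur pre hc]
  simp only [List.foldl_cons]
  have h1 : (if (!([] : List Int).isEmpty || cur == cur) = true then ([] : List Int) ++ [cur] else []) = [cur] := by
    simp
  rw [h1, pv_emit_go cur suf [cur] (by simp)]
  rfl

theorem pv_filter_remove_one (l : List Int) (p : Int → Bool) (c : Int)
    (hn : l.Nodup) (hm : c ∈ l) (hp : p c = true) :
    (l.filter (fun x => p x && !(x == c))).length + 1 = (l.filter p).length := by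
  induction l with
  | nil => cases hm
  | cons a t ih =>
    rcases List.nodup_cons.mp hn with ⟨hat, hnt⟩
    rcases List.mem_cons.mp hm with rfl | hct
    · have h2 : t.filter (fun x => p x && !(x == c)) = t.filter p := by
        apply List.filter_congr
        intro x hx
        have : x ≠ c := fun h => hat (h ▸ hx)
        simp [this]
      simp [h2, hp]
    · have hac : a ≠ c := fun h => hat (h ▸ hct)
      cases hpa : p a with
      | true =>
        have := ih hnt hct
        simp [hpa, hac]
        omega
      | false => simpa [hpa, hac] using ih hnt hct

theorem pv_rem_step (succ : List (Int × Int)) (order : List Int) (cur : Int)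
    (hmem : cur ∈ succ.map Prod.fst) (hno : cur ∉ order) :
    pvRem succ (order ++ [cur]) + 1 = pvRem succ order := by
  unfold pvRem
  have hcong : ((succ.map Prod.fst).dedup).filter (fun x => !((order ++ [cur]).contains x))
      = ((succ.map Prod.fst).dedup).filter (fun x => (!(order.contains x)) && !(x == cur)) := by
    apply List.filter_congr
    intro x _
    by_cases hxc : x = cur
    · subst hxc; simp [hno]
    · by_cases hx : x ∈ order <;> simp [hx, hxc]
  rw [hcong]
  exact pv_filter_remove_one _ _ cur (List.nodup_dedup _) (List.mem_dedup.mpr hmem)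
    (by simp [hno])

theorem pv_length_le (succ : List (Int × Int)) (order : List Int)
    (hnd : order.Nodup) (hkeys : ∀ x ∈ order, ((PySem.Dict.mk succ).get? x).isSome) :
    order.length ≤ succ.length := by
  have hsub : order ⊆ (succ.map Prod.fst).dedup := by
    intro x hx
    exact List.mem_dedup.mpr ((pv_get?_mk_isSome_iff succ x).mp (by simpa using hkeys x hx))
  calc order.length ≤ ((succ.map Prod.fst).dedup).length :=
        (List.subperm_of_subset hnd hsub).length_le
    _ ≤ (succ.map Prod.fst).length := (List.dedup_sublist _).length_le
    _ = succ.length := List.length_map ..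

-- Stage 1: A's loop equals emit ∘ reference walk.
theorem pv_loop_eq (succ : List (Int × Int)) :
    ∀ (fb : Nat) (fa : Nat) (seen : PySem.Dict Int Int) (order : List Int) (cur : Int) (step : Int),
      pvRem succ order < fb → pvRem succ order < fa →
      step = (order.length : Int) →
      order.Nodup →
      (∀ x ∈ order, ((PySem.Dict.mk succ).get? x).isSome) →
      (∀ x, seen.get? x = (PySem.List.index? order x).map (fun i => (i : Int))) →
      subtourA_loop succ fa seen order cur step
        = (fun st => pvRefEmit succ st.2.1 st.2.2) (pvRefLoop succ fb order order cur) := by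
  intro fb
  induction fb with
  | zero => intro fa seen order cur step hfb _ _ _ _ _; omega
  | succ m ih =>
    intro fa seen order cur step hfb hfa hstep hnd hkeys hseen
    obtain ⟨fa', rfl⟩ : ∃ k, fa = k + 1 := ⟨fa - 1, by omega⟩
    cases hg : (PySem.Dict.mk succ).get? cur with
    | none =>
      have hA : subtourA_loop succ (fa' + 1) seen order cur step = none := by
        simp [subtourA_loop, hg]
      have hB : pvRefLoop succ (m + 1) order order cur = (order, order, cur) := by
        simp [pvRefLoop, hg]
      rw [hA, hB]
      simp [pvRefEmit, hg]
    | some nxt =>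
      cases hs : seen.get? cur with
      | some idx =>
        have hmap := hseen cur
        rw [hs] at hmap
        cases hi : PySem.List.index? order cur with
        | none => rw [hi] at hmap; cases hmap
        | some j =>
          rw [hi] at hmap
          have hidx : idx = (j : Int) := by simpa using hmap
          have hcur : cur ∈ order := by
            have := PySem.List.index?_eq_none_iff order cur
            by_contra h
            rw [(PySem.List.index?_eq_none_iff order cur).mpr h] at hi; cases hi
          have hA : subtourA_loop succ (fa' + 1) seen order cur step
              = PySem.List.slice order (some idx) none := by
            simp [subtourA_loop, hg, hs]
          have hB : pvRefLoop succ (m + 1) order order cur = (order, order, cur) := by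
            simp [pvRefLoop, hg, hcur]
          rw [hA, hB]
          obtain ⟨pre, suf, heq, hlen, hpre⟩ := (PySem.List.index?_eq_some_iff _ _ _).mp hi
          simp only [pvRefEmit, hg, hidx]
          rw [PySem.List.slice_from_natCast]
          rw [heq, pv_emit_eq cur pre suf hpre, ← hlen, List.drop_left]
      | none =>
        have hmap := hseen cur
        rw [hs] at hmap
        have hcur : cur ∉ order := by
          cases hi : PySem.List.index? order cur with
          | some j => rw [hi] at hmap; cases hmap
          | none => exact (PySem.List.index?_eq_none_iff order cur).mp hi
        have hlen : order.length ≤ succ.length := pv_length_le succ order hnd hkeys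
        have hnotbreak : ¬ (step + 1 > (succ.length : Int) + 5) := by
          rw [hstep]; omega
        have hadd : PySem.Set.add order cur = order ++ [cur] := by
          simp only [PySem.Set.add]
          rw [if_neg (by simp_all [PySem.Set.contains])]
        have hA : subtourA_loop succ (fa' + 1) seen order cur step
            = subtourA_loop succ fa' (seen.insert cur (order.length : Int)) (order ++ [cur]) nxt (step + 1) := by
          simp [subtourA_loop, hg, hs, hnotbreak]
        have hB : pvRefLoop succ (m + 1) order order cur
            = pvRefLoop succ m (order ++ [cur]) (order ++ [cur]) nxt := by
          simp [pvRefLoop, hg, hcur]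
        rw [hA, hB]
        have hmem : cur ∈ succ.map Prod.fst := (pv_get?_mk_isSome_iff succ cur).mp (by simp [hg])
        have hrem := pv_rem_step succ order cur hmem hcur
        exact ih fa' (seen.insert cur (order.length : Int)) (order ++ [cur]) nxt (step + 1)
          (by omega) (by omega)
          (by rw [hstep]; simp)
          (by simp [List.nodup_append, hnd]; exact fun a ha h => hcur (h ▸ ha))
          (by intro x hx
              rcases List.mem_append.mp hx with h | h
              · exact hkeys x h
              · simp only [List.mem_singleton] at h; subst h; simp [hg])
          (by intro x
              rw [PySem.Dict.get?_insert, pv_index?_append_singleton order cur x hcur]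
              split
              · rfl
              · exact hseen x)

-- ===== Stage 2: the reference walk equals B =====

-- invariant of the reference walk's state
def pvInv (succ : List (Int × Int)) (start : Int) (path : List Int) (cur : Int) : Prop :=
  List.IsChain (fun a b => (PySem.Dict.mk succ).get? a = some b) (path ++ [cur]) ∧
  path.Nodup ∧
  (∀ x ∈ path, ((PySem.Dict.mk succ).get? x).isSome = true) ∧
  (path ++ [cur]).getD 0 0 = start

theorem pvRef_spec (succ : List (Int × Int)) (start : Int) :
    ∀ (fuel : Nat) (path : List Int) (cur : Int), pvRem succ path < fuel →
      pvInv succ start path cur →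
      pvInv succ start (pvRefLoop succ fuel path path cur).2.1 (pvRefLoop succ fuel path path cur).2.2 ∧
      ((PySem.Dict.mk succ).get? (pvRefLoop succ fuel path path cur).2.2 = none ∨
        (pvRefLoop succ fuel path path cur).2.2 ∈ (pvRefLoop succ fuel path path cur).2.1) := by
  intro fuel
  induction fuel with
  | zero => intro path cur h _; omega
  | succ m ih =>
    intro path cur hfb hinv
    obtain ⟨hch, hnd, hkeys, hstart⟩ := hinv
    cases hg : (PySem.Dict.mk succ).get? cur with
    | none =>
      have hB : pvRefLoop succ (m + 1) path path cur = (path, path, cur) := by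
        simp [pvRefLoop, hg]
      rw [hB]
      exact ⟨⟨hch, hnd, hkeys, hstart⟩, Or.inl hg⟩
    | some nxt =>
      by_cases hcur : cur ∈ path
      · have hB : pvRefLoop succ (m + 1) path path cur = (path, path, cur) := by
          simp [pvRefLoop, hg, hcur]
        rw [hB]
        exact ⟨⟨hch, hnd, hkeys, hstart⟩, Or.inr hcur⟩
      · have hB : pvRefLoop succ (m + 1) path path cur
            = pvRefLoop succ m (path ++ [cur]) (path ++ [cur]) nxt := by
          simp [pvRefLoop, hg, hcur]
        rw [hB]
        have hmem : cur ∈ succ.map Prod.fst := (pv_get?_mk_isSome_iff succ cur).mp (by simp [hg])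
        have hrem := pv_rem_step succ path cur hmem hcur
        apply ih (path ++ [cur]) nxt (by omega)
        refine ⟨?_, ?_, ?_, ?_⟩
        · rw [List.isChain_append]
          refine ⟨hch, List.IsChain.singleton nxt, ?_⟩
          intro x hx y hy
          simp only [List.getLast?_concat, Option.mem_def, Option.some.injEq] at hx
          simp only [List.head?_cons, Option.mem_def, Option.some.injEq] at hy
          rw [← hx, ← hy]
          exact hg
        · simp [List.nodup_append, hnd]
          exact fun a ha h => hcur (h ▸ ha)
        · intro x hx
          rcases List.mem_append.mp hx with h | h
          · exact hkeys x h
          · simp only [List.mem_singleton] at h; subst h; simp [hg]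
        · rw [List.getD_append _ _ 0 0 (by simp)]
          exact hstart

-- (m+1) % l steps cyclically
theorem pv_mod_succ (m l : Nat) (hl : 0 < l) :
    (m + 1) % l = if m % l + 1 = l then 0 else m % l + 1 := by
  have h := Nat.mod_lt m hl
  by_cases hc : m % l + 1 = l
  · rw [if_pos hc]
    calc (m + 1) % l = (m % l + 1) % l := by rw [Nat.mod_add_mod]
      _ = l % l := by rw [hc]
      _ = 0 := Nat.mod_self l
  · rw [if_neg hc, ← Nat.mod_add_mod, Nat.mod_eq_of_lt (by omega)]

-- index map of the eventually-periodic chain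
def pvI (mu lam i : Nat) : Nat := if i < mu then i else mu + (i - mu) % lam

theorem pvI_lt (mu lam i : Nat) (hl : 0 < lam) : pvI mu lam i < mu + lam := by
  unfold pvI
  split
  · omega
  · have := Nat.mod_lt (i - mu) hl
    omega

theorem pvI_zero (mu lam : Nat) : pvI mu lam 0 = 0 := by
  unfold pvI
  split
  · rfl
  · next h =>
    have hmu : mu = 0 := by omega
    simp [hmu]

theorem pvI_mu (mu lam : Nat) : pvI mu lam mu = mu := by
  simp [pvI]

theorem pvI_small (mu lam i : Nat) (h : i < mu + lam) : pvI mu lam i = i := by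
  unfold pvI
  split
  · rfl
  · next hge =>
    rw [Nat.mod_eq_of_lt (by omega)]
    omega

theorem pvI_succ (mu lam i : Nat) (hl : 0 < lam) :
    pvI mu lam (i + 1) = if pvI mu lam i + 1 = mu + lam then mu else pvI mu lam i + 1 := by
  have hml := Nat.mod_lt (i - mu) hl
  by_cases hi : i + 1 ≤ mu
  · have h1 : pvI mu lam i = i := by unfold pvI; rw [if_pos (by omega)]
    have h2 : pvI mu lam (i + 1) = i + 1 := by
      unfold pvI
      split
      · rfl
      · next h =>
        have he : i + 1 = mu := by omega
        simp [he]
    rw [h1, h2, if_neg (by omega)]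
  · have h1 : pvI mu lam i = mu + (i - mu) % lam := by unfold pvI; rw [if_neg (by omega)]
    have h2 : pvI mu lam (i + 1) = mu + ((i - mu) + 1) % lam := by
      unfold pvI
      rw [if_neg (by omega)]
      have he : i + 1 - mu = (i - mu) + 1 := by omega
      rw [he]
    rw [h1, h2, pv_mod_succ _ _ hl]
    by_cases hc : (i - mu) % lam + 1 = lam
    · rw [if_pos hc, if_pos (by omega)]
      omega
    · rw [if_neg hc, if_neg (by omega)]
      omega

theorem pv_addmod_ne (s j lam : Nat) (h1 : 1 ≤ j) (h2 : j < lam) :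
    (s + j) % lam ≠ s % lam := by
  intro h
  have hme : Nat.ModEq lam (s + j) (s + 0) := by simpa [Nat.ModEq] using h
  have hj : Nat.ModEq lam j 0 := Nat.ModEq.add_left_cancel' s hme
  have h0 : j % lam = 0 := by simpa [Nat.ModEq] using hj
  rw [Nat.mod_eq_of_lt h2] at h0
  omega

-- advancing k steps along the chain
theorem pv_adv_X (d : PySem.Dict Int Int) (X : Nat → Int) (mu lam : Nat)
    (hstep : ∀ i, d.get? (X (pvI mu lam i)) = some (X (pvI mu lam (i + 1)))) :
    ∀ (k i : Nat), subtourB_adv d k (X (pvI mu lam i)) = some (X (pvI mu lam (i + k))) := by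
  intro k
  induction k with
  | zero => intro i; simp [subtourB_adv]
  | succ k ih =>
    intro i
    have h := hstep i
    simp only [subtourB_adv, h]
    have he : i + 1 + k = i + (k + 1) := by omega
    rw [ih (i + 1), he]

-- the lam loop measures the cycle length
theorem pv_lam_X (d : PySem.Dict Int Int) (X : Nat → Int) (mu lam : Nat) (hl : 0 < lam)
    (hstep : ∀ i, d.get? (X (pvI mu lam i)) = some (X (pvI mu lam (i + 1))))
    (hinj : ∀ i j, i < mu + lam → j < mu + lam → X i = X j → i = j)
    (n : Nat) (hn : mu + lam ≤ n) :
    ∀ (fuel j : Nat), 1 ≤ j → j ≤ lam → lam - j < fuel →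
      subtourB_lam d (X (pvI mu lam n)) fuel (X (pvI mu lam (n + j))) j = some lam := by
  intro fuel
  induction fuel with
  | zero => intro j h1 h2 h3; omega
  | succ f ih =>
    intro j h1 h2 h3
    by_cases hj : j = lam
    · rw [hj]
      have heq : X (pvI mu lam (n + lam)) = X (pvI mu lam n) := by
        congr 1
        unfold pvI
        rw [if_neg (by omega), if_neg (by omega)]
        have he : n + lam - mu = (n - mu) + lam := by omega
        rw [he, Nat.add_mod_right]
      simp only [subtourB_lam]
      rw [heq, if_pos rfl]
    · have hjl : j < lam := by omega
      have hne : ¬ X (pvI mu lam (n + j)) = X (pvI mu lam n) := by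
        intro h
        have hi1 := pvI_lt mu lam (n + j) hl
        have hi2 := pvI_lt mu lam n hl
        have hij := hinj _ _ hi1 hi2 h
        unfold pvI at hij
        rw [if_neg (by omega), if_neg (by omega)] at hij
        have he : n + j - mu = (n - mu) + j := by omega
        rw [he] at hij
        have hmod : ((n - mu) + j) % lam = (n - mu) % lam := by omega
        exact pv_addmod_ne (n - mu) j lam h1 hjl hmod
      simp only [subtourB_lam, if_neg hne]
      rw [hstep (n + j)]
      have he : n + j + 1 = n + (j + 1) := by omega
      rw [he]
      exact ih (j + 1) (by omega) (by omega) (by omega)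

-- the two-pointer loop meets at the entry
theorem pv_entry_X (d : PySem.Dict Int Int) (X : Nat → Int) (mu lam : Nat) (hl : 0 < lam)
    (hstep : ∀ i, d.get? (X (pvI mu lam i)) = some (X (pvI mu lam (i + 1))))
    (hinj : ∀ i j, i < mu + lam → j < mu + lam → X i = X j → i = j) :
    ∀ (fuel j : Nat), j ≤ mu → mu - j < fuel →
      subtourB_entry d fuel (X (pvI mu lam j)) (X (pvI mu lam (j + lam))) = some (X mu) := by
  intro fuel
  induction fuel with
  | zero => intro j h1 h2; omega
  | succ f ih =>
    intro j h1 h2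
    by_cases hj : j = mu
    · rw [hj]
      have heq : X (pvI mu lam (mu + lam)) = X (pvI mu lam mu) := by
        congr 1
        unfold pvI
        rw [if_neg (by omega), if_neg (by omega)]
        have he : mu + lam - mu = lam := by omega
        have he2 : mu - mu = 0 := by omega
        rw [he, he2, Nat.mod_self, Nat.zero_mod]
      simp only [subtourB_entry]
      rw [heq, if_pos rfl, pvI_mu]
    · have hjm : j < mu := by omega
      have hne : ¬ X (pvI mu lam j) = X (pvI mu lam (j + lam)) := by
        intro h
        have hi1 := pvI_lt mu lam j hl
        have hi2 := pvI_lt mu lam (j + lam) hl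
        have hij := hinj _ _ hi1 hi2 h
        rw [pvI_small mu lam j (by omega), pvI_small mu lam (j + lam) (by omega)] at hij
        omega
      simp only [subtourB_entry, if_neg hne]
      rw [hstep j, hstep (j + lam)]
      have he : j + lam + 1 = (j + 1) + lam := by omega
      rw [he]
      exact ih (j + 1) (by omega) (by omega)

-- the collect loop walks once around the cycle
theorem pv_collect_X (d : PySem.Dict Int Int) (X : Nat → Int) (mu lam : Nat) (hl : 0 < lam)
    (hstep : ∀ i, d.get? (X (pvI mu lam i)) = some (X (pvI mu lam (i + 1))))
    (hinj : ∀ i j, i < mu + lam → j < mu + lam → X i = X j → i = j)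
    (cyc : List Int) (hlen : cyc.length = lam)
    (hget : ∀ j, j < lam → X (mu + j) = cyc.getD j 0) :
    ∀ (fuel j : Nat), 1 ≤ j → j ≤ lam → lam - j < fuel →
      subtourB_collect d (X mu) fuel (X (pvI mu lam (mu + j))) (cyc.take j) = some cyc := by
  intro fuel
  induction fuel with
  | zero => intro j h1 h2 h3; omega
  | succ f ih =>
    intro j h1 h2 h3
    by_cases hj : j = lam
    · rw [hj]
      have heq : X (pvI mu lam (mu + lam)) = X mu := by
        congr 1
        unfold pvI
        rw [if_neg (by omega)]
        have he : mu + lam - mu = lam := by omega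
        rw [he, Nat.mod_self]
        omega
      simp only [subtourB_collect]
      rw [heq, if_pos rfl, ← hlen, List.take_length]
    · have hjl : j < lam := by omega
      have hne : ¬ X (pvI mu lam (mu + j)) = X mu := by
        intro h
        have hi1 := pvI_lt mu lam (mu + j) hl
        have hij := hinj _ _ hi1 (by omega) h
        rw [pvI_small mu lam (mu + j) (by omega)] at hij
        omega
      simp only [subtourB_collect, if_neg hne]
      rw [hstep (mu + j)]
      have hacc : cyc.take j ++ [X (pvI mu lam (mu + j))] = cyc.take (j + 1) := by
        rw [pvI_small mu lam (mu + j) (by omega), hget j hjl,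
            List.getD_eq_getElem cyc 0 (by omega)]
        exact List.take_append_getElem (by omega)
      rw [hacc]
      have he : mu + j + 1 = mu + (j + 1) := by omega
      rw [he]
      exact ih (j + 1) (by omega) (by omega) (by omega)

theorem pv_adv_add (d : PySem.Dict Int Int) :
    ∀ (a b : Nat) (x : Int), subtourB_adv d (a + b) x
      = (subtourB_adv d a x).bind (fun y => subtourB_adv d b y) := by
  intro a
  induction a with
  | zero => intro b x; simp [subtourB_adv]
  | succ a ih =>
    intro b x
    have he : a + 1 + b = (a + b) + 1 := by omega
    rw [he]
    simp only [subtourB_adv]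
    cases h : d.get? x with
    | none => simp
    | some nxt => simpa using ih b nxt

theorem pv_adv_chainlist (d : PySem.Dict Int Int) :
    ∀ (ys : List Int) (c : Int), List.IsChain (fun a b => d.get? a = some b) (ys ++ [c]) →
      subtourB_adv d ys.length (ys.headD c) = some c := by
  intro ys
  induction ys with
  | nil => intro c _; simp [subtourB_adv]
  | cons a t ih =>
    intro c hch
    cases t with
    | nil =>
      have hr : d.get? a = some c := (List.isChain_cons_cons.mp hch).1
      simp [subtourB_adv, hr]
    | cons b t' =>
      have h1 := List.isChain_cons_cons.mp hch
      simp only [List.length_cons, List.headD_cons, subtourB_adv, h1.1]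
      exact ih c h1.2

theorem pv_headD_append (P : List Int) (c : Int) : (P ++ [c]).getD 0 0 = P.headD c := by
  cases P <;> rfl

-- terminating chain: B returns none
theorem pv_term_case (succ : List (Int × Int)) (start : Int) (P : List Int) (c : Int)
    (hinv : pvInv succ start P c)
    (hgc : (PySem.Dict.mk succ).get? c = none) :
    subtour_from_py_alt start succ = none := by
  obtain ⟨hch, hnd, hkeys, hstart⟩ := hinv
  have hLn : P.length ≤ succ.length := pv_length_le succ P hnd hkeys
  have hstart' : P.headD c = start := by rw [← pv_headD_append P c]; exact hstart
  have hadv : subtourB_adv (PySem.Dict.mk succ) P.length start = some c := by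
    rw [← hstart']
    exact pv_adv_chainlist _ P c hch
  rcases Nat.lt_or_ge P.length succ.length with hlt | hge
  · have hnone : subtourB_adv (PySem.Dict.mk succ) succ.length start = none := by
      have he : succ.length = P.length + (succ.length - P.length) := by omega
      rw [he, pv_adv_add, hadv]
      obtain ⟨m, hm⟩ : ∃ m, succ.length - P.length = m + 1 := ⟨succ.length - P.length - 1, by omega⟩
      rw [hm]
      simp [subtourB_adv, hgc]
    simp [subtour_from_py_alt, hnone]
  · have he : succ.length = P.length := by omega
    simp [subtour_from_py_alt, he, hadv, hgc]

-- cyclic chain: B returns the cycle from the entry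
theorem pv_cyc_case (succ : List (Int × Int)) (start : Int) (pre suf : List Int) (c : Int)
    (hinv : pvInv succ start (pre ++ c :: suf) c) :
    subtour_from_py_alt start succ = some (c :: suf) := by
  obtain ⟨hch, hnd, hkeys, hstart⟩ := hinv
  have hLn : (pre ++ c :: suf).length ≤ succ.length := pv_length_le succ _ hnd hkeys
  have hPlen : (pre ++ c :: suf).length = pre.length + (suf.length + 1) := by simp
  have hl : 0 < suf.length + 1 := by omega
  have hn : pre.length + (suf.length + 1) ≤ succ.length := by omega
  have hXP : ∀ i, i < pre.length + (suf.length + 1) →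
      ((pre ++ c :: suf) ++ [c]).getD i 0 = (pre ++ c :: suf).getD i 0 := by
    intro i h
    exact List.getD_append _ _ 0 i (by omega)
  have hlink : ∀ i, i < pre.length + (suf.length + 1) →
      (PySem.Dict.mk succ).get? (((pre ++ c :: suf) ++ [c]).getD i 0)
        = some (((pre ++ c :: suf) ++ [c]).getD (i + 1) 0) := by
    intro i h
    have h2 : i + 1 < ((pre ++ c :: suf) ++ [c]).length := by simp; omega
    have hc2 := List.isChain_iff_getElem.mp hch i h2
    rw [List.getD_eq_getElem _ 0 (by simp; omega), List.getD_eq_getElem _ 0 h2]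
    exact hc2
  have hXc : ((pre ++ c :: suf) ++ [c]).getD (pre.length + (suf.length + 1)) 0 = c := by
    rw [List.getD_append_right _ _ 0 _ (by omega)]
    have he : pre.length + (suf.length + 1) - (pre ++ c :: suf).length = 0 := by omega
    rw [he]
    rfl
  have hXmu : ((pre ++ c :: suf) ++ [c]).getD pre.length 0 = c := by
    rw [List.getD_append _ _ 0 _ (by omega),
        List.getD_append_right pre (c :: suf) 0 pre.length (le_refl _)]
    have he : pre.length - pre.length = 0 := by omega
    rw [he]
    rfl
  have hinjX : ∀ i j, i < pre.length + (suf.length + 1) → j < pre.length + (suf.length + 1) →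
      ((pre ++ c :: suf) ++ [c]).getD i 0 = ((pre ++ c :: suf) ++ [c]).getD j 0 → i = j := by
    intro i j hi hj h
    rw [hXP i hi, hXP j hj,
        List.getD_eq_getElem _ 0 (by omega), List.getD_eq_getElem _ 0 (by omega)] at h
    exact (List.Nodup.getElem_inj_iff hnd).mp h
  have hstepX : ∀ i, (PySem.Dict.mk succ).get?
      (((pre ++ c :: suf) ++ [c]).getD (pvI pre.length (suf.length + 1) i) 0)
      = some (((pre ++ c :: suf) ++ [c]).getD (pvI pre.length (suf.length + 1) (i + 1)) 0) := by
    intro i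
    have hp := pvI_lt pre.length (suf.length + 1) i hl
    have h1 := hlink (pvI pre.length (suf.length + 1) i) hp
    rw [pvI_succ _ _ i hl]
    by_cases hcase : pvI pre.length (suf.length + 1) i + 1 = pre.length + (suf.length + 1)
    · rw [if_pos hcase, h1, hcase, hXc, hXmu]
    · rw [if_neg hcase]
      exact h1
  have hgetc : ∀ j, j < suf.length + 1 →
      ((pre ++ c :: suf) ++ [c]).getD (pre.length + j) 0 = (c :: suf).getD j 0 := by
    intro j hj
    rw [hXP _ (by omega),
        List.getD_append_right pre (c :: suf) 0 _ (by omega)]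
    congr 1
    omega
  have hadv0 : ∀ k, subtourB_adv (PySem.Dict.mk succ) k start
      = some (((pre ++ c :: suf) ++ [c]).getD (pvI pre.length (suf.length + 1) k) 0) := by
    intro k
    have h : subtourB_adv (PySem.Dict.mk succ) k (((pre ++ c :: suf) ++ [c]).getD (pvI pre.length (suf.length + 1) 0) 0)
        = some (((pre ++ c :: suf) ++ [c]).getD (pvI pre.length (suf.length + 1) (0 + k)) 0) :=
      pv_adv_X (PySem.Dict.mk succ) (fun i => ((pre ++ c :: suf) ++ [c]).getD i 0) pre.length (suf.length + 1) hstepX k 0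
    rw [pvI_zero, hstart, Nat.zero_add] at h
    exact h
  have h2 := hstepX succ.length
  have h3 : subtourB_lam (PySem.Dict.mk succ) (((pre ++ c :: suf) ++ [c]).getD (pvI pre.length (suf.length + 1) succ.length) 0)
      (succ.length + 1) (((pre ++ c :: suf) ++ [c]).getD (pvI pre.length (suf.length + 1) (succ.length + 1)) 0) 1
      = some (suf.length + 1) :=
    pv_lam_X (PySem.Dict.mk succ) (fun i => ((pre ++ c :: suf) ++ [c]).getD i 0) pre.length (suf.length + 1) hl hstepX hinjX
      succ.length hn (succ.length + 1) 1 (le_refl 1) hl (by omega)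
  have h4 := hadv0 (suf.length + 1)
  have h5 : subtourB_entry (PySem.Dict.mk succ) (succ.length + 1)
      (((pre ++ c :: suf) ++ [c]).getD (pvI pre.length (suf.length + 1) 0) 0)
      (((pre ++ c :: suf) ++ [c]).getD (pvI pre.length (suf.length + 1) (0 + (suf.length + 1))) 0)
      = some (((pre ++ c :: suf) ++ [c]).getD pre.length 0) :=
    pv_entry_X (PySem.Dict.mk succ) (fun i => ((pre ++ c :: suf) ++ [c]).getD i 0) pre.length (suf.length + 1) hl hstepX hinjX
      (succ.length + 1) 0 (by omega) (by omega)
  rw [pvI_zero, hstart, Nat.zero_add, hXmu] at h5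
  have h6 : (PySem.Dict.mk succ).get? c
      = some (((pre ++ c :: suf) ++ [c]).getD (pvI pre.length (suf.length + 1) (pre.length + 1)) 0) := by
    have h := hstepX pre.length
    rw [pvI_mu, hXmu] at h
    exact h
  have h7 : subtourB_collect (PySem.Dict.mk succ) (((pre ++ c :: suf) ++ [c]).getD pre.length 0) (succ.length + 1)
      (((pre ++ c :: suf) ++ [c]).getD (pvI pre.length (suf.length + 1) (pre.length + 1)) 0)
      ((c :: suf).take 1) = some (c :: suf) :=
    pv_collect_X (PySem.Dict.mk succ) (fun i => ((pre ++ c :: suf) ++ [c]).getD i 0) pre.length (suf.length + 1) hl hstepX hinjX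
      (c :: suf) (by simp) hgetc (succ.length + 1) 1 (le_refl 1) hl (by omega)
  rw [hXmu] at h7
  have e7 : (c :: suf).take 1 = [c] := by simp
  rw [e7] at h7
  simp only [subtour_from_py_alt]
  rw [hadv0 succ.length]
  simp only [h2, h3, h4, h5, h6, h7]

-- ===== VERDICT (by name: the statement is the Claim_ definition above) =====
theorem subtour_from_py_spec : Claim_equal_subtour_from_py := by
  intro start succ _
  unfold Spec_subtour_from_py subtour_from_py
  have hbound : pvRem succ [] ≤ succ.length := by
    unfold pvRem
    calc (((succ.map Prod.fst).dedup).filter _).length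
        ≤ ((succ.map Prod.fst).dedup).length := List.length_filter_le _ _
      _ ≤ (succ.map Prod.fst).length := (List.dedup_sublist _).length_le
      _ = succ.length := List.length_map ..
  have h := pv_loop_eq succ (succ.length + 1) (succ.length + 6) PySem.Dict.empty [] start 0
    (by omega) (by omega) (by simp) (by simp) (by intro x h; cases h)
    (by intro x; simp [PySem.Dict.get?_empty, PySem.List.index?_eq_idxOf?])
  rw [h]
  have hinv0 : pvInv succ start [] start := by
    unfold pvInv
    refine ⟨List.IsChain.singleton start, List.nodup_nil, ?_, rfl⟩
    intro x h
    cases h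
  obtain ⟨hinv, hstop⟩ := pvRef_spec succ start (succ.length + 1) [] start (by omega) hinv0
  set st := pvRefLoop succ (succ.length + 1) [] [] start with hst
  cases hgc : (PySem.Dict.mk succ).get? st.2.2 with
  | none =>
    show pvRefEmit succ st.2.1 st.2.2 = _
    have : pvRefEmit succ st.2.1 st.2.2 = none := by simp [pvRefEmit, hgc]
    rw [this, pv_term_case succ start st.2.1 st.2.2 hinv hgc]
  | some w =>
    have hmem : st.2.2 ∈ st.2.1 := by
      rcases hstop with h | h
      · rw [hgc] at h; cases h
      · exact h
    have hi : ∃ k, PySem.List.index? st.2.1 st.2.2 = some k := by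
      rcases Option.isSome_iff_exists.mp ((PySem.List.index?_isSome_iff _ _).mpr hmem) with ⟨k, hk⟩
      exact ⟨k, hk⟩
    obtain ⟨k, hk⟩ := hi
    obtain ⟨pre, suf, heq, hlen, hpre⟩ := (PySem.List.index?_eq_some_iff _ _ _).mp hk
    show pvRefEmit succ st.2.1 st.2.2 = _
    have hemit : pvRefEmit succ st.2.1 st.2.2 = some (st.2.2 :: suf) := by
      simp only [pvRefEmit, hgc]
      rw [heq, pv_emit_eq st.2.2 pre suf hpre]
    rw [hemit]
    rw [heq] at hinv
    exact (pv_cyc_case succ start pre suf st.2.2 hinv).symm
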